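-- pv_equiv track=rewrite | github.com/dylanjoao/CS3CI | Evolution/main.py | invert_section_circular
-- ===== SOURCE A (Python) =====
-- def invert_section_circular(lst, start, end):
--     length = len(lst)
--     section_length = (end - start + 1) % length  # Calculate section length
--
--     inverted_section = []
--     for i in range(section_length):
--         index = (start + i) % length
--         inverted_section.append(lst[index])
--
--     inverted_section = inverted_section[::-1]
--
--     result = lst.copy()
--     for i in range(section_length):
--         index = (start + i) % length
--         result[index] = inverted_section[i]
--
--     return result
-- ===== SOURCE B (Python) =====
-- def invert_section_circular(lst, start, end):
--     length = len(lst)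
--     section_length = (end - start + 1) % length
--     result = lst.copy()
--     for i in range(section_length // 2):
--         a = (start + i) % length
--         b = (start + section_length - 1 - i) % length
--         result[a], result[b] = result[b], result[a]
--     return result
-- ===== Notes on version B (the rewrite author's own statement) =====
-- stated objective: simpler
-- what changed: Replaced A's three-pass gather/slice-reverse/write-back with a single half-length loop that reverses the circular window in place by symmetric swaps, maintaining no auxiliary list.
import Mathlib
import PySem

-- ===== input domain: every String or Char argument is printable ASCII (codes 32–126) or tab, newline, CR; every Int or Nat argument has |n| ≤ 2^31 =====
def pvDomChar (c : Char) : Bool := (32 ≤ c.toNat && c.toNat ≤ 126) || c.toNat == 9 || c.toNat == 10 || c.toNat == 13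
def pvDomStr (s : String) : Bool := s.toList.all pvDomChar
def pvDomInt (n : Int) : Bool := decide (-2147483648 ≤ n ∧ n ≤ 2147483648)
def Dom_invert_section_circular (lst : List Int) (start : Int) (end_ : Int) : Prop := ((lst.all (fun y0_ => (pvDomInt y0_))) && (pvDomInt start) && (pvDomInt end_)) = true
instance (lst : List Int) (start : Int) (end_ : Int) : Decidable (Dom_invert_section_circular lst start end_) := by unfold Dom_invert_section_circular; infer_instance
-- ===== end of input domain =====

-- B reverses the circular window in place with a single half-length swap loop instead of
-- A's gather / slice-reverse / write-back three-pass decomposition (objective: simpler).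


-- ===== PORT A =====
-- Literal port of A: gather the window, reverse it with [::-1], write it back.
-- lst[index] is ported as pyGetD … 0 / pySetD: index = (start+i) % length is always in range here.
def invert_section_circular (lst : List Int) (start : Int) (end_ : Int) : List Int :=
  let length : Int := PySem.List.len lst
  let section_length : Int := PySem.Int.mod (end_ - start + 1) length
  let inverted_section : List Int :=
    (PySem.List.pyRange 0 section_length 1).foldl
      (fun acc i => acc ++ [PySem.List.pyGetD lst (PySem.Int.mod (start + i) length) 0]) []
  let inverted_section : List Int :=
    (PySem.List.slice? inverted_section none none (-1)).getD []
  (PySem.List.pyRange 0 section_length 1).foldl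
    (fun result i =>
      PySem.List.pySetD result (PySem.Int.mod (start + i) length)
        (PySem.List.pyGetD inverted_section i 0)) lst

-- ===== PORT B =====
-- Literal port of B: copy, then swap symmetric positions of the circular window for
-- i in range(section_length // 2); 'result[a], result[b] = result[b], result[a]'.
def invert_section_circular_alt (lst : List Int) (start : Int) (end_ : Int) : List Int :=
  let length : Int := PySem.List.len lst
  let section_length : Int := PySem.Int.mod (end_ - start + 1) length
  (PySem.List.pyRange 0 (PySem.Int.floordiv section_length 2) 1).foldl
    (fun result i =>
      let a := PySem.Int.mod (start + i) length
      let b := PySem.Int.mod (start + section_length - 1 - i) length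
      let va := PySem.List.pyGetD result b 0
      let vb := PySem.List.pyGetD result a 0
      PySem.List.pySetD (PySem.List.pySetD result a va) b vb) lst

-- ===== PRECONDITION & SPEC =====
-- On lst = [] the Python A raises ZeroDivisionError at '% length'; Pre_ excludes exactly that.
def Pre_invert_section_circular (lst : List Int) (start : Int) (end_ : Int) : Prop := lst ≠ []
instance (lst : List Int) (start : Int) (end_ : Int) : Decidable (Pre_invert_section_circular lst start end_) := by unfold Pre_invert_section_circular; infer_instance
def pvWitness_invert_section_circular : List Int × Int × Int := ([1, 2, 3, 4, 5], 3, 6)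

def Spec_invert_section_circular (lst : List Int) (start : Int) (end_ : Int) (out : List Int) : Prop := out = invert_section_circular_alt lst start end_
instance (lst : List Int) (start : Int) (end_ : Int) (out : List Int) : Decidable (Spec_invert_section_circular lst start end_ out) := by unfold Spec_invert_section_circular; infer_instance

-- ===== CLAIM (what is proved, stated in full; the proofs are below) =====
def Claim_equal_invert_section_circular : Prop := ∀ (lst : List Int) (start : Int) (end_ : Int), Dom_invert_section_circular lst start end_ → Pre_invert_section_circular lst start end_ → Spec_invert_section_circular lst start end_ (invert_section_circular lst start end_)

-- ===== LEMMAS AND PROOFS =====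

-- A sequence of in-place writes 'result[p] = v'.
def pvWrites (lst : List Int) (ws : List (Nat × Int)) : List Int :=
  ws.foldl (fun acc w => acc.set w.1 w.2) lst

-- (start + i) % len(lst), as a natural index.
def pvIdx (lst : List Int) (start : Int) (i : Nat) : Nat :=
  (PySem.Int.mod (start + (i : Int)) ((lst.length : Int))).toNat

-- section_length, as a natural number.
def pvM (lst : List Int) (start : Int) (end_ : Int) : Nat :=
  (PySem.Int.mod (end_ - start + 1) ((lst.length : Int))).toNat

-- the writes A performs
def pvWA (lst : List Int) (start : Int) (end_ : Int) : List (Nat × Int) :=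
  (List.range (pvM lst start end_)).map
    (fun i => (pvIdx lst start i, lst.getD (pvIdx lst start (pvM lst start end_ - 1 - i)) 0))

-- one swap block of B
def pvBlk (lst : List Int) (start : Int) (M : Nat) (i : Nat) : List (Nat × Int) :=
  [(pvIdx lst start i, lst.getD (pvIdx lst start (M - 1 - i)) 0),
   (pvIdx lst start (M - 1 - i), lst.getD (pvIdx lst start i) 0)]

-- the writes B performs
def pvWB (lst : List Int) (start : Int) (end_ : Int) : List (Nat × Int) :=
  (List.range (pvM lst start end_ / 2)).flatMap (pvBlk lst start (pvM lst start end_))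

theorem pvWrites_append (lst : List Int) (l1 l2 : List (Nat × Int)) :
    pvWrites lst (l1 ++ l2) = pvWrites (pvWrites lst l1) l2 := by
  simp [pvWrites, List.foldl_append]

theorem length_pvWrites (lst : List Int) (ws : List (Nat × Int)) :
    (pvWrites lst ws).length = lst.length := by
  induction ws generalizing lst with
  | nil => rfl
  | cons w t ih => simp [pvWrites, List.foldl_cons] at *; rw [ih]; simp

theorem pvWrites_getElem?_not_mem (lst : List Int) (ws : List (Nat × Int)) (j : Nat)
    (h : ∀ w ∈ ws, w.1 ≠ j) : (pvWrites lst ws)[j]? = lst[j]? := by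
  induction ws generalizing lst with
  | nil => rfl
  | cons w t ih =>
    have h1 : w.1 ≠ j := h w (by simp)
    have := ih (lst.set w.1 w.2) (fun x hx => h x (by simp [hx]))
    simpa [pvWrites, List.foldl_cons, List.getElem?_set_ne h1] using this

theorem pvIdx_lt (lst : List Int) (start : Int) (i : Nat) (h : lst ≠ []) :
    pvIdx lst start i < lst.length := by
  have hn : (0 : Int) < (lst.length : Int) := by
    exact_mod_cast List.length_pos_iff.mpr h
  have := PySem.Int.mod_lt (start + (i : Int)) hn
  have h0 := PySem.Int.mod_nonneg (start + (i : Int)) hn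
  unfold pvIdx
  omega

theorem pvIdx_inj (lst : List Int) (start : Int) (i j : Nat) (h : lst ≠ [])
    (hi : i < lst.length) (hj : j < lst.length) (he : pvIdx lst start i = pvIdx lst start j) :
    i = j := by
  have hn : (0 : Int) < (lst.length : Int) := by
    exact_mod_cast List.length_pos_iff.mpr h
  have e1 := PySem.Int.mod_eq_emod_of_pos (a := start + (i : Int)) hn
  have e2 := PySem.Int.mod_eq_emod_of_pos (a := start + (j : Int)) hn
  have h0i := PySem.Int.mod_nonneg (start + (i : Int)) hn
  have h0j := PySem.Int.mod_nonneg (start + (j : Int)) hn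
  have heq : (start + (i : Int)) % (lst.length : Int) = (start + (j : Int)) % (lst.length : Int) := by
    unfold pvIdx at he
    omega
  obtain ⟨c, hc⟩ := Int.ModEq.dvd (heq : Int.ModEq _ _ _)
  have hb1 : (start + (j : Int)) - (start + (i : Int)) = (j : Int) - (i : Int) := by ring
  rw [hb1] at hc
  have hlt1 : (j : Int) - (i : Int) < (lst.length : Int) := by omega
  have hlt2 : -((lst.length : Int)) < (j : Int) - (i : Int) := by omega
  have hc1 : c < 1 := by nlinarith
  have hc2 : -1 < c := by nlinarith
  have : c = 0 := by omega
  rw [this] at hc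
  omega

theorem pvM_lt (lst : List Int) (start : Int) (end_ : Int) (h : lst ≠ []) :
    pvM lst start end_ < lst.length := by
  have hn : (0 : Int) < (lst.length : Int) := by
    exact_mod_cast List.length_pos_iff.mpr h
  have := PySem.Int.mod_lt (end_ - start + 1) hn
  have h0 := PySem.Int.mod_nonneg (end_ - start + 1) hn
  unfold pvM
  omega

theorem getD_reverse_map_range (g : Nat → Int) (M k : Nat) (hk : k < M) :
    (((List.range M).map g).reverse).getD k 0 = g (M - 1 - k) := by
  have hlen : k < ((List.range M).map g).length := by simpa using hk
  rw [List.getD_eq_getElem?_getD, List.getElem?_reverse hlen]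
  rw [List.length_map, List.length_range, List.getElem?_map, List.getElem?_range (by omega)]
  rfl

theorem A_char (lst : List Int) (start : Int) (end_ : Int) (h : lst ≠ []) :
    invert_section_circular lst start end_ = pvWrites lst (pvWA lst start end_) := by
  have hn : (0 : Int) < (lst.length : Int) := by exact_mod_cast List.length_pos_iff.mpr h
  have hm0 := PySem.Int.mod_nonneg (end_ - start + 1) hn
  have hM : PySem.Int.mod (end_ - start + 1) (lst.length : Int) = ((pvM lst start end_ : Nat) : Int) := by
    unfold pvM; omega
  unfold invert_section_circular
  simp only [PySem.List.len_eq, hM, PySem.List.pyRange_zero_natCast, List.foldl_map,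
    PySem.List.slice?_none_none_neg_one, Option.getD_some,
    PySem.List.foldl_append_singleton_eq_map, List.nil_append]
  rw [pvWA, pvWrites, List.foldl_map]
  apply PySem.List.foldl_congr_mem
  intro acc k hk
  have hkM : k < pvM lst start end_ := List.mem_range.mp hk
  have hg : PySem.List.pyGetD
      (((List.range (pvM lst start end_)).map
        (fun i => PySem.List.pyGetD lst (PySem.Int.mod (start + ↑i) (lst.length : Int)) 0)).reverse)
      (k : Int) 0
      = lst.getD (pvIdx lst start (pvM lst start end_ - 1 - k)) 0 := by
    rw [PySem.List.pyGetD_natCast, getD_reverse_map_range _ _ _ hkM,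
      PySem.List.pyGetD_of_nonneg _ _ (PySem.Int.mod_nonneg _ hn)]
    rfl
  rw [hg, PySem.List.pySetD_of_nonneg acc _ (PySem.Int.mod_nonneg _ hn)]
  rfl

-- the swap step of B, on natural indices
def pvStep (lst0 : List Int) (start : Int) (M : Nat) (acc : List Int) (k : Nat) : List Int :=
  (acc.set (pvIdx lst0 start k) (acc.getD (pvIdx lst0 start (M - 1 - k)) 0)).set
    (pvIdx lst0 start (M - 1 - k)) (acc.getD (pvIdx lst0 start k) 0)

theorem pvWB_pos_lt (lst : List Int) (start : Int) (M t j : Nat) (h : lst ≠ [])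
    (hM : M < lst.length) (ht : t < M / 2) (hj : j < lst.length)
    (hread : j = pvIdx lst start t ∨ j = pvIdx lst start (M - 1 - t))
    (w : Nat × Int) (hw : w ∈ (List.range t).flatMap (pvBlk lst start M)) : w.1 ≠ j := by
  obtain ⟨i, hi, hwi⟩ := List.mem_flatMap.mp hw
  have hit : i < t := List.mem_range.mp hi
  have hinj := pvIdx_inj lst start
  intro hj1
  have hw1 : w.1 = pvIdx lst start i ∨ w.1 = pvIdx lst start (M - 1 - i) := by
    simp only [pvBlk, List.mem_cons, List.not_mem_nil, or_false] at hwi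
    rcases hwi with h1 | h1
    · exact Or.inl (by rw [h1])
    · exact Or.inr (by rw [h1])
  rcases hw1 with h1 | h1 <;> rcases hread with hr | hr
  · have := hinj i t h (by omega) (by omega) (by rw [← h1, hj1, hr]); omega
  · have := hinj i (M - 1 - t) h (by omega) (by omega) (by rw [← h1, hj1, hr]); omega
  · have := hinj (M - 1 - i) t h (by omega) (by omega) (by rw [← h1, hj1, hr]); omega
  · have := hinj (M - 1 - i) (M - 1 - t) h (by omega) (by omega) (by rw [← h1, hj1, hr]); omega

theorem B_loop (lst : List Int) (start : Int) (M : Nat) (h : lst ≠ []) (hM : M < lst.length)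
    (t : Nat) (ht : t ≤ M / 2) :
    (List.range t).foldl (pvStep lst start M) lst
      = pvWrites lst ((List.range t).flatMap (pvBlk lst start M)) := by
  induction t with
  | zero => rfl
  | succ t ih =>
    have ht' : t ≤ M / 2 := by omega
    rw [List.range_succ, List.foldl_append, List.flatMap_append, pvWrites_append, ih ht']
    simp only [List.foldl_cons, List.foldl_nil, List.flatMap_cons, List.flatMap_nil,
      List.append_nil]
    have hr : ∀ j, (j = pvIdx lst start t ∨ j = pvIdx lst start (M - 1 - t)) →
        (pvWrites lst ((List.range t).flatMap (pvBlk lst start M))).getD j 0 = lst.getD j 0 := by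
      intro j hj
      have hjlt : j < lst.length := by
        rcases hj with hj | hj <;> rw [hj] <;> exact pvIdx_lt _ _ _ h
      rw [List.getD_eq_getElem?_getD, List.getD_eq_getElem?_getD,
        pvWrites_getElem?_not_mem _ _ _ (fun w hw =>
          pvWB_pos_lt lst start M t j h hM (by omega) hjlt hj w hw)]
    show pvStep lst start M _ t = pvWrites _ (pvBlk lst start M t)
    rw [pvStep, hr _ (Or.inl rfl), hr _ (Or.inr rfl)]
    simp [pvWrites, pvBlk]

theorem B_char (lst : List Int) (start : Int) (end_ : Int) (h : lst ≠ []) :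
    invert_section_circular_alt lst start end_ = pvWrites lst (pvWB lst start end_) := by
  have hn : (0 : Int) < (lst.length : Int) := by exact_mod_cast List.length_pos_iff.mpr h
  have hm0 := PySem.Int.mod_nonneg (end_ - start + 1) hn
  have hM : PySem.Int.mod (end_ - start + 1) (lst.length : Int) = ((pvM lst start end_ : Nat) : Int) := by
    unfold pvM; omega
  have hH : PySem.Int.floordiv ((pvM lst start end_ : Nat) : Int) 2 = ((pvM lst start end_ / 2 : Nat) : Int) := by
    rw [PySem.Int.floordiv_eq_ediv_of_pos (by norm_num)]
    exact_mod_cast (Int.natCast_div (pvM lst start end_) 2).symm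
  unfold invert_section_circular_alt
  simp only [PySem.List.len_eq, hM, hH, PySem.List.pyRange_zero_natCast, List.foldl_map]
  rw [pvWB]
  rw [← B_loop lst start (pvM lst start end_) h (pvM_lt lst start end_ h) (pvM lst start end_ / 2) le_rfl]
  apply PySem.List.foldl_congr_mem
  intro acc k hk
  have hkH : k < pvM lst start end_ / 2 := List.mem_range.mp hk
  have hkM : k < pvM lst start end_ := by omega
  have harg : start + ((pvM lst start end_ : Nat) : Int) - 1 - (k : Int)
      = start + (((pvM lst start end_ - 1 - k : Nat)) : Int) := by omega
  rw [harg, PySem.List.pyGetD_of_nonneg _ _ (PySem.Int.mod_nonneg _ hn),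
    PySem.List.pyGetD_of_nonneg _ _ (PySem.Int.mod_nonneg _ hn),
    PySem.List.pySetD_of_nonneg _ _ (PySem.Int.mod_nonneg _ hn),
    PySem.List.pySetD_of_nonneg _ _ (PySem.Int.mod_nonneg _ hn)]
  rfl

theorem pvWrites_getElem?_unique (lst : List Int) (ws : List (Nat × Int)) (j : Nat) (v : Int)
    (hj : j < lst.length) (hmem : (j, v) ∈ ws)
    (huniq : ∀ w ∈ ws, w.1 = j → w = (j, v)) :
    (pvWrites lst ws)[j]? = some v := by
  induction ws generalizing lst with
  | nil => exact absurd hmem (by simp)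
  | cons w t ih =>
    have hstep : pvWrites lst (w :: t) = pvWrites (lst.set w.1 w.2) t := rfl
    by_cases hmt : (j, v) ∈ t
    · rw [hstep]
      exact ih (lst.set w.1 w.2) (by simpa using hj) hmt
        (fun u hu h1 => huniq u (by simp [hu]) h1)
    · have hw : w = (j, v) := by
        rcases List.mem_cons.mp hmem with h1 | h1
        · exact h1.symm
        · exact absurd h1 hmt
      rw [hstep, pvWrites_getElem?_not_mem _ _ _ (fun u (hu : u ∈ t) h1 =>
        hmt ((huniq u (List.mem_cons_of_mem w hu) h1) ▸ hu))]
      rw [hw]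
      exact List.getElem?_set_self (by simpa using hj)

-- what A writes at a window position
theorem pvWA_mem (lst : List Int) (start : Int) (end_ : Int) (i : Nat)
    (hi : i < pvM lst start end_) :
    (pvIdx lst start i, lst.getD (pvIdx lst start (pvM lst start end_ - 1 - i)) 0)
      ∈ pvWA lst start end_ := by
  unfold pvWA
  exact List.mem_map.mpr ⟨i, List.mem_range.mpr hi, rfl⟩

theorem pvWB_mem_shape (lst : List Int) (start : Int) (end_ : Int) (w : Nat × Int)
    (hw : w ∈ pvWB lst start end_) :
    ∃ i, i < pvM lst start end_ / 2 ∧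
      (w = (pvIdx lst start i, lst.getD (pvIdx lst start (pvM lst start end_ - 1 - i)) 0) ∨
       w = (pvIdx lst start (pvM lst start end_ - 1 - i), lst.getD (pvIdx lst start i) 0)) := by
  obtain ⟨i, hi, hwi⟩ := List.mem_flatMap.mp hw
  refine ⟨i, List.mem_range.mp hi, ?_⟩
  simpa [pvBlk] using hwi

-- ===== VERDICT (by name: the statement is the Claim_ definition above) =====
theorem invert_section_circular_spec : Claim_equal_invert_section_circular := by
  intro lst start end_ _hDom hPre
  unfold Spec_invert_section_circular
  rw [A_char _ _ _ hPre, B_char _ _ _ hPre]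
  have hMlt := pvM_lt lst start end_ hPre
  have hinj := pvIdx_inj lst start
  have hIlt := fun i => pvIdx_lt lst start i hPre
  apply List.ext_getElem?
  intro j
  by_cases hj : j < lst.length
  · by_cases hex : ∃ i, i < pvM lst start end_ ∧ pvIdx lst start i = j
    · obtain ⟨i0, hi0, hid⟩ := hex
      have huniq : ∀ i, i < pvM lst start end_ → pvIdx lst start i = j → i = i0 :=
        fun i hi hij => hinj i i0 hPre (by omega) (by omega) (hij.trans hid.symm)
      have hA : (pvWrites lst (pvWA lst start end_))[j]?
          = some (lst.getD (pvIdx lst start (pvM lst start end_ - 1 - i0)) 0) := by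
        apply pvWrites_getElem?_unique _ _ _ _ hj (hid ▸ pvWA_mem lst start end_ i0 hi0)
        intro w hw h1
        obtain ⟨i, hi, hwi⟩ := List.mem_map.mp (by exact hw : w ∈ pvWA lst start end_)
        have hiM : i < pvM lst start end_ := List.mem_range.mp hi
        have : i = i0 := huniq i hiM (by rw [← h1, ← hwi])
        rw [← hwi, this, hid]
      rw [hA]
      rcases lt_trichotomy (2 * i0 + 1) (pvM lst start end_) with hlt | heq2 | hgt
      · -- i0 is in the first half: B's swap i0 writes the same value at j
        symm
        apply pvWrites_getElem?_unique _ _ _ _ hj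
        · refine List.mem_flatMap.mpr ⟨i0, List.mem_range.mpr (by omega), ?_⟩
          simp [pvBlk, hid]
        · intro w hw h1
          obtain ⟨i, hiH, hsh⟩ := pvWB_mem_shape lst start end_ w hw
          rcases hsh with hsh | hsh
          · have : i = i0 := huniq i (by omega) (by rw [← h1, hsh])
            rw [hsh, this, hid]
          · have : pvM lst start end_ - 1 - i = i0 :=
              huniq _ (by omega) (by rw [← h1, hsh])
            omega
      · -- i0 is the middle of an odd window: B leaves j alone, A rewrites its own value
        have hmid : pvM lst start end_ - 1 - i0 = i0 := by omega
        rw [hmid, hid, pvWrites_getElem?_not_mem, List.getElem?_eq_getElem hj,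
          List.getD_eq_getElem lst 0 hj]
        intro w hw h1
        obtain ⟨i, hiH, hsh⟩ := pvWB_mem_shape lst start end_ w hw
        rcases hsh with hsh | hsh
        · have : i = i0 := huniq i (by omega) (by rw [← h1, hsh])
          omega
        · have : pvM lst start end_ - 1 - i = i0 := huniq _ (by omega) (by rw [← h1, hsh])
          omega
      · -- i0 is in the second half: B's swap (M-1-i0) writes the same value at j
        have hi1 : pvM lst start end_ - 1 - (pvM lst start end_ - 1 - i0) = i0 := by omega
        symm
        apply pvWrites_getElem?_unique _ _ _ _ hj
        · refine List.mem_flatMap.mpr ⟨pvM lst start end_ - 1 - i0,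
            List.mem_range.mpr (by omega), ?_⟩
          simp [pvBlk, hi1, hid]
        · intro w hw h1
          obtain ⟨i, hiH, hsh⟩ := pvWB_mem_shape lst start end_ w hw
          rcases hsh with hsh | hsh
          · have : i = i0 := huniq i (by omega) (by rw [← h1, hsh])
            omega
          · have h2 : pvM lst start end_ - 1 - i = i0 :=
              huniq _ (by omega) (by rw [← h1, hsh])
            have : i = pvM lst start end_ - 1 - i0 := by omega
            rw [hsh, this, hi1, hid]
    · -- j is outside the window: both sides keep lst[j]
      rw [pvWrites_getElem?_not_mem, pvWrites_getElem?_not_mem]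
      · intro w hw h1
        obtain ⟨i, hiH, hsh⟩ := pvWB_mem_shape lst start end_ w hw
        rcases hsh with hsh | hsh
        · exact hex ⟨i, by omega, by rw [← h1, hsh]⟩
        · exact hex ⟨pvM lst start end_ - 1 - i, by omega, by rw [← h1, hsh]⟩
      · intro w hw h1
        obtain ⟨i, hi, hwi⟩ := List.mem_map.mp (by exact hw : w ∈ pvWA lst start end_)
        exact hex ⟨i, List.mem_range.mp hi, by rw [← h1, ← hwi]⟩
  · rw [List.getElem?_eq_none (by rw [length_pvWrites]; omega),
      List.getElem?_eq_none (by rw [length_pvWrites]; omega)]
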